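-- pv_equiv track=rewrite | github.com/Yeeasy11/sumoRL | experiments/make_route_4way_arrival_distributions.py | _flows_for_direction
-- ===== SOURCE A (Python) =====
-- TURN_WEIGHTS = {"left": 0.2, "straight": 0.6, "right": 0.2}
--
-- def _flows_for_direction(flow: int) -> dict[str, int]:
--     vals = {
--         turn: max(1, int(round(flow * ratio))) for turn, ratio in TURN_WEIGHTS.items()
--     }
--     # Adjust rounding drift to keep exact per-direction total.
--     drift = int(flow - sum(vals.values()))
--     if drift != 0:
--         vals["straight"] = max(1, vals["straight"] + drift)
--     return vals
-- ===== SOURCE B (Python) =====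
-- TURN_WEIGHTS = {"left": 0.2, "straight": 0.6, "right": 0.2}
--
-- def _flows_for_direction(flow: int) -> dict[str, int]:
--     left = max(1, int(round(flow * TURN_WEIGHTS["left"])))
--     right = max(1, int(round(flow * TURN_WEIGHTS["right"])))
--     straight = max(1, flow - left - right)
--     return {"left": left, "straight": straight, "right": right}
-- ===== Notes on version B (the rewrite author's own statement) =====
-- stated objective: simpler
-- what changed: B computes left and right by rounding as before but derives straight as the clamped remainder max(1, flow - left - right), eliminating A's rounded-straight-plus-drift-correction branch.
import Mathlib
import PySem

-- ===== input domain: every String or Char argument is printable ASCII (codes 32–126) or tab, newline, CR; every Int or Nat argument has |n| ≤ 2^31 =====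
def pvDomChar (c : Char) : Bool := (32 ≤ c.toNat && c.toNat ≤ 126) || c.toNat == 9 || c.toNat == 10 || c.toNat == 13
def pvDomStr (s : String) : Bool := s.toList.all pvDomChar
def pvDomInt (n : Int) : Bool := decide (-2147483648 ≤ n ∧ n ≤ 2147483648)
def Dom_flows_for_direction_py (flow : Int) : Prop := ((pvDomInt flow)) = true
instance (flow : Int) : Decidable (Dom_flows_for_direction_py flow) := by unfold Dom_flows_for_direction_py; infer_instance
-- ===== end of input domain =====

-- B derives the straight count as the clamped remainder flow - left - right instead of rounding it
-- and then patching the total (objective: simpler; same result, proved below).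

-- int(round(flow * ratio)) for ratio = num/10 (num ∈ {2, 6}), ported exactly as an integer
-- nearest-int formula: for |flow| ≤ 2^31 the float product flow*ratio is never within 1e-7 of a
-- half-integer (flow*2/10 = k+1/2 resp. flow*6/10 = k+1/2 has no integer solution, the real value
-- stays ≥ 1/10 away and the float error is < 1e-6), so Python's round-half-even equals the nearest
-- integer to num*flow/10, i.e. (num*flow + 5) // 10 (exactness checked against CPython on the domain).
def pyRoundTenth (flow : Int) (num : Int) : Int := PySem.Int.floordiv (num * flow + 5) 10

-- ===== PORT A =====
def flows_for_direction_py (flow : Int) : List (String × Int) :=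
  -- vals = {turn: max(1, int(round(flow * ratio))) for turn, ratio in TURN_WEIGHTS.items()}
  let vals : PySem.Dict String Int :=
    (((PySem.Dict.empty).insert "left" (max 1 (pyRoundTenth flow 2))).insert
        "straight" (max 1 (pyRoundTenth flow 6))).insert
      "right" (max 1 (pyRoundTenth flow 2))
  -- drift = int(flow - sum(vals.values()))
  let drift : Int := flow - vals.values.foldl (· + ·) 0
  -- if drift != 0: vals["straight"] = max(1, vals["straight"] + drift)
  let vals :=
    if drift ≠ 0 then vals.insert "straight" (max 1 (vals.getD "straight" 0 + drift)) else vals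
  vals.items

-- ===== PORT B =====
def flows_for_direction_py_alt (flow : Int) : List (String × Int) :=
  let left := max 1 (pyRoundTenth flow 2)
  let right := max 1 (pyRoundTenth flow 2)
  let straight := max 1 (flow - left - right)
  [("left", left), ("straight", straight), ("right", right)]

-- ===== PRECONDITION & SPEC =====
def Spec_flows_for_direction_py (flow : Int) (out : List (String × Int)) : Prop := out = flows_for_direction_py_alt flow
instance (flow : Int) (out : List (String × Int)) : Decidable (Spec_flows_for_direction_py flow out) := by unfold Spec_flows_for_direction_py; infer_instance

-- ===== CLAIM (what is proved, stated in full; the proofs are below) =====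
def Claim_equal_flows_for_direction_py : Prop := ∀ (flow : Int), Dom_flows_for_direction_py flow → Spec_flows_for_direction_py flow (flows_for_direction_py flow)

-- ===== LEMMAS AND PROOFS =====

-- ===== VERDICT (by name: the statement is the Claim_ definition above) =====
theorem flows_for_direction_py_spec : Claim_equal_flows_for_direction_py := by
  intro flow _
  unfold Spec_flows_for_direction_py flows_for_direction_py flows_for_direction_py_alt
  generalize pyRoundTenth flow 2 = a
  generalize pyRoundTenth flow 6 = b
  simp only [PySem.Dict.insert, PySem.Dict.empty, PySem.Dict.values, PySem.Dict.items,
    PySem.Dict.getD, PySem.Dict.get?, List.map]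
  split_ifs <;> simp_all <;> omega
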